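-- pv_equiv track=rewrite | github.com/digitalgoldfisj79/Voynichdecomp | p70_grammar_validation.py | decompose_generic
-- ===== SOURCE A (Python) =====
-- def decompose_generic(token, prefix_list, gallows_list, suffix_list):
--     """Greedy 4-slot decomposition with given inventories."""
--     rem = token
--     pfx = '∅'
--     for p in sorted(prefix_list, key=len, reverse=True):
--         if p and rem.startswith(p):
--             pfx = p
--             rem = rem[len(p):]
--             break
--     gal = '∅'
--     for g in sorted(gallows_list, key=len, reverse=True):
--         if g and rem.startswith(g):
--             gal = g
--             rem = rem[len(g):]
--             break
--     sfx = '∅'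
--     for s in sorted(suffix_list, key=len, reverse=True):
--         if s and rem.endswith(s) and len(rem) > len(s):
--             sfx = s
--             rem = rem[:len(rem)-len(s)]
--             break
--     core = rem if rem else '∅'
--     return pfx, gal, core, sfx
-- ===== SOURCE B (Python) =====
-- def decompose_generic(token, prefix_list, gallows_list, suffix_list):
--     """Greedy 4-slot decomposition with given inventories (single-pass longest match)."""
--     def longest(cands, ok):
--         best = None
--         for c in cands:
--             if c and ok(c) and (best is None or len(c) > len(best)):
--                 best = c
--         return best
--
--     rem = token
--     p = longest(prefix_list, lambda c: rem.startswith(c))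
--     if p is None:
--         pfx = '∅'
--     else:
--         pfx = p
--         rem = rem[len(p):]
--     g = longest(gallows_list, lambda c: rem.startswith(c))
--     if g is None:
--         gal = '∅'
--     else:
--         gal = g
--         rem = rem[len(g):]
--     s = longest(suffix_list, lambda c: rem.endswith(c) and len(rem) > len(c))
--     if s is None:
--         sfx = '∅'
--     else:
--         sfx = s
--         rem = rem[:len(rem)-len(s)]
--     core = rem if rem else '∅'
--     return pfx, gal, core, sfx
-- ===== Notes on version B (the rewrite author's own statement) =====
-- stated objective: alternative
-- what changed: Replaces each sort-by-length-then-first-match scan with a single linear pass in original list order that keeps the longest matching candidate (strict '>' so ties keep the earliest element, matching the stable sort's order); no sorting is done.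
import Mathlib
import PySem

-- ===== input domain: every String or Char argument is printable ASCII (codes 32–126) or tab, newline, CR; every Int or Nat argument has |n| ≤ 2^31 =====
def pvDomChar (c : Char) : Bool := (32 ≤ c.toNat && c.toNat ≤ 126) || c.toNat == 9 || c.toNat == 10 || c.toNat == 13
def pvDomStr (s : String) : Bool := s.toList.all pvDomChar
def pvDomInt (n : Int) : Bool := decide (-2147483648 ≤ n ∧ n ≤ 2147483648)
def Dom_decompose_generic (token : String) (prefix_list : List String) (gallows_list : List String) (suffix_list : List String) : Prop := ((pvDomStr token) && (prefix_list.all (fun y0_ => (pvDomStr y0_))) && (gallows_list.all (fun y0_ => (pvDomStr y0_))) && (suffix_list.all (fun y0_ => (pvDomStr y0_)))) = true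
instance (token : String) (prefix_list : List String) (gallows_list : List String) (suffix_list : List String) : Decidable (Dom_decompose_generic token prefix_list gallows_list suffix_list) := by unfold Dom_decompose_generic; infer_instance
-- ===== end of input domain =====

-- B replaces each sort-by-length-then-first-match scan by a single linear pass keeping the
-- longest matching candidate (alternative algorithm: no sorting of the inventories).


-- ===== PORT A =====
-- A's prefix/gallows loop: walk the (descending-length, stable) sorted list, break at the
-- first non-empty p with rem.startswith(p), returning the updated (slot, rem).
def pvScanPre (rem : String) (d : String) : List String → String × String
  | [] => (d, rem)
  | p :: rest =>
    if decide (p ≠ "") && PySem.Str.startswith rem p then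
      (p, PySem.Str.slice rem (some (PySem.Str.len p)) none)
    else pvScanPre rem d rest

-- A's suffix loop: same walk, condition 's and rem.endswith(s) and len(rem) > len(s)',
-- stripping rem[:len(rem)-len(s)].
def pvScanSuf (rem : String) (d : String) : List String → String × String
  | [] => (d, rem)
  | s :: rest =>
    if decide (s ≠ "") && PySem.Str.endswith rem s && decide (PySem.Str.len s < PySem.Str.len rem) then
      (s, PySem.Str.slice rem none (some (PySem.Str.len rem - PySem.Str.len s)))
    else pvScanSuf rem d rest

def decompose_generic (token : String) (prefix_list : List String) (gallows_list : List String) (suffix_list : List String) : String × String × String × String :=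
  let (pfx, rem1) := pvScanPre token "∅" (PySem.List.sorted prefix_list PySem.Str.len true)
  let (gal, rem2) := pvScanPre rem1 "∅" (PySem.List.sorted gallows_list PySem.Str.len true)
  let (sfx, rem3) := pvScanSuf rem2 "∅" (PySem.List.sorted suffix_list PySem.Str.len true)
  (pfx, gal, if rem3 = "" then "∅" else rem3, sfx)

-- ===== PORT B =====
-- 'best is None or len(c) > len(best)'
def pvBeats (best : Option String) (c : String) : Bool :=
  match best with
  | none => true
  | some b => decide (PySem.Str.len b < PySem.Str.len c)

-- B's single pass: keep the longest non-empty candidate satisfying ok (strict '>').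
def pvLongest (ok : String → Bool) (cands : List String) : Option String :=
  cands.foldl (fun best c => if decide (c ≠ "") && ok c && pvBeats best c then some c else best) none

def decompose_generic_alt (token : String) (prefix_list : List String) (gallows_list : List String) (suffix_list : List String) : String × String × String × String :=
  let (pfx, rem1) :=
    match pvLongest (fun c => PySem.Str.startswith token c) prefix_list with
    | none => ("∅", token)
    | some p => (p, PySem.Str.slice token (some (PySem.Str.len p)) none)
  let (gal, rem2) :=
    match pvLongest (fun c => PySem.Str.startswith rem1 c) gallows_list with
    | none => ("∅", rem1)
    | some g => (g, PySem.Str.slice rem1 (some (PySem.Str.len g)) none)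
  let (sfx, rem3) :=
    match pvLongest (fun c => PySem.Str.endswith rem2 c && decide (PySem.Str.len c < PySem.Str.len rem2)) suffix_list with
    | none => ("∅", rem2)
    | some s => (s, PySem.Str.slice rem2 none (some (PySem.Str.len rem2 - PySem.Str.len s)))
  (pfx, gal, if rem3 = "" then "∅" else rem3, sfx)

-- ===== PRECONDITION & SPEC =====
def Spec_decompose_generic (token : String) (prefix_list : List String) (gallows_list : List String) (suffix_list : List String) (out : String × String × String × String) : Prop := out = decompose_generic_alt token prefix_list gallows_list suffix_list
instance (token : String) (prefix_list : List String) (gallows_list : List String) (suffix_list : List String) (out : String × String × String × String) : Decidable (Spec_decompose_generic token prefix_list gallows_list suffix_list out) := by unfold Spec_decompose_generic; infer_instance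

-- ===== CLAIM (what is proved, stated in full; the proofs are below) =====
def Claim_equal_decompose_generic : Prop := ∀ (token : String) (prefix_list : List String) (gallows_list : List String) (suffix_list : List String), Dom_decompose_generic token prefix_list gallows_list suffix_list → Spec_decompose_generic token prefix_list gallows_list suffix_list (decompose_generic token prefix_list gallows_list suffix_list)

-- ===== LEMMAS AND PROOFS =====

-- Inserting x behind all elements of equal-or-greater length into a descending list:
-- the first match of the result is x exactly when x matches and beats the old first match.
lemma pvFind?_insertBy (cond : String → Bool) (x : String) (S : List String)
    (hS : S.Pairwise (fun a b => PySem.Str.len b ≤ PySem.Str.len a)) :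
    (PySem.List.insertBy (fun a b => decide (PySem.Str.len b < PySem.Str.len a)) x S).find? cond
      = if cond x && pvBeats (S.find? cond) x then some x else S.find? cond := by
  induction S with
  | nil =>
    cases h : cond x <;> simp [PySem.List.insertBy, List.find?, pvBeats, h]
  | cons y ys ih =>
    obtain ⟨hy, hys⟩ := List.pairwise_cons.mp hS
    by_cases hlt : PySem.Str.len y < PySem.Str.len x
    · simp only [PySem.List.insertBy, hlt, decide_true, if_true]
      cases hcx : cond x with
      | false =>
        rw [List.find?_cons_of_neg (by simp [hcx]), if_neg (by simp)]
      | true =>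
        have hb : (cond x && pvBeats (List.find? cond (y :: ys)) x) = true := by
          cases hf : List.find? cond (y :: ys) with
          | none => simp [pvBeats, hcx]
          | some b =>
            have hbmem := List.mem_of_find?_eq_some hf
            have hble : PySem.Str.len b ≤ PySem.Str.len y := by
              rcases List.mem_cons.mp hbmem with h | h
              · subst h; exact le_rfl
              · exact hy b h
            simp only [hcx, pvBeats, Bool.true_and, decide_eq_true_eq]
            simp only [PySem.Str.len_eq] at hble hlt ⊢
            omega
        rw [List.find?_cons_of_pos hcx]
        simp only [hcx] at hb ⊢
        rw [if_pos hb]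
    · simp only [PySem.List.insertBy, hlt, decide_false, Bool.false_eq_true, if_false]
      cases hcy : cond y with
      | true =>
        have h1 : List.find? cond (y :: ys) = some y := List.find?_cons_of_pos hcy
        have hpb : pvBeats (some y) x = false := by
          simp only [pvBeats, decide_eq_false_iff_not]
          exact hlt
        rw [h1, List.find?_cons_of_pos hcy, if_neg (by simp [hpb])]
      | false =>
        rw [List.find?_cons_of_neg (by simp [hcy]), List.find?_cons_of_neg (by simp [hcy]),
          ih hys]

-- Main lemma: first match in the stable descending-length sort = B's single-pass longest.
lemma pvFind?_sorted_eq_foldl (cond : String → Bool) (l : List String) :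
    (PySem.List.sorted l PySem.Str.len true).find? cond
      = l.foldl (fun best c => if cond c && pvBeats best c then some c else best) none := by
  induction l using List.reverseRecOn with
  | nil => simp [PySem.List.sorted_rev_eq_foldl_insertBy]
  | append_singleton l x ih =>
    have hsort : PySem.List.sorted (l ++ [x]) PySem.Str.len true
        = PySem.List.insertBy (fun a b => decide (PySem.Str.len b < PySem.Str.len a)) x
            (PySem.List.sorted l PySem.Str.len true) := by
      rw [PySem.List.sorted_rev_eq_foldl_insertBy, PySem.List.sorted_rev_eq_foldl_insertBy,
        List.foldl_append]
      rfl
    rw [hsort, pvFind?_insertBy cond x _ (PySem.List.sorted_pairwise_rev l PySem.Str.len),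
      List.foldl_append, ih]
    rfl

-- A's prefix/gallows scan, expressed through find?.
lemma pvScanPre_eq_find? (rem d : String) (l : List String) :
    pvScanPre rem d l
      = match l.find? (fun p => decide (p ≠ "") && PySem.Str.startswith rem p) with
        | none => (d, rem)
        | some p => (p, PySem.Str.slice rem (some (PySem.Str.len p)) none) := by
  induction l with
  | nil => rfl
  | cons p rest ih =>
    by_cases h : (decide (p ≠ "") && PySem.Str.startswith rem p) = true
    · simp only [pvScanPre]
      rw [if_pos h, List.find?_cons_of_pos (p := fun p => decide (p ≠ "") && PySem.Str.startswith rem p) h]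
    · simp only [pvScanPre]
      rw [if_neg h, List.find?_cons_of_neg (p := fun p => decide (p ≠ "") && PySem.Str.startswith rem p) h, ih]

-- A's suffix scan, expressed through find?.
lemma pvScanSuf_eq_find? (rem d : String) (l : List String) :
    pvScanSuf rem d l
      = match l.find? (fun s => decide (s ≠ "") && PySem.Str.endswith rem s && decide (PySem.Str.len s < PySem.Str.len rem)) with
        | none => (d, rem)
        | some s => (s, PySem.Str.slice rem none (some (PySem.Str.len rem - PySem.Str.len s))) := by
  induction l with
  | nil => rfl
  | cons s rest ih =>
    by_cases h : (decide (s ≠ "") && PySem.Str.endswith rem s && decide (PySem.Str.len s < PySem.Str.len rem)) = true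
    · simp only [pvScanSuf]
      rw [if_pos h, List.find?_cons_of_pos (p := fun s => decide (s ≠ "") && PySem.Str.endswith rem s && decide (PySem.Str.len s < PySem.Str.len rem)) h]
    · simp only [pvScanSuf]
      rw [if_neg h, List.find?_cons_of_neg (p := fun s => decide (s ≠ "") && PySem.Str.endswith rem s && decide (PySem.Str.len s < PySem.Str.len rem)) h, ih]

-- Slot lemma, prefix/gallows: A's scan over the sorted list equals B's match expression.
lemma pvSlotPre (rem : String) (l : List String) :
    pvScanPre rem "∅" (PySem.List.sorted l PySem.Str.len true)
      = match pvLongest (fun c => PySem.Str.startswith rem c) l with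
        | none => ("∅", rem)
        | some p => (p, PySem.Str.slice rem (some (PySem.Str.len p)) none) := by
  rw [pvScanPre_eq_find?,
    pvFind?_sorted_eq_foldl (fun p => decide (p ≠ "") && PySem.Str.startswith rem p) l]
  rfl

-- Slot lemma, suffix (the B-side ok also carries the len(rem) > len(s) guard).
lemma pvSlotSuf (rem : String) (l : List String) :
    pvScanSuf rem "∅" (PySem.List.sorted l PySem.Str.len true)
      = match pvLongest (fun c => PySem.Str.endswith rem c && decide (PySem.Str.len c < PySem.Str.len rem)) l with
        | none => ("∅", rem)
        | some s => (s, PySem.Str.slice rem none (some (PySem.Str.len rem - PySem.Str.len s))) := by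
  rw [pvScanSuf_eq_find?,
    pvFind?_sorted_eq_foldl (fun s => decide (s ≠ "") && PySem.Str.endswith rem s && decide (PySem.Str.len s < PySem.Str.len rem)) l]
  simp only [pvLongest, Bool.and_assoc]

-- ===== VERDICT (by name: the statement is the Claim_ definition above) =====
theorem decompose_generic_spec : Claim_equal_decompose_generic := by
  intro token prefix_list gallows_list suffix_list _
  show decompose_generic token prefix_list gallows_list suffix_list
      = decompose_generic_alt token prefix_list gallows_list suffix_list
  unfold decompose_generic decompose_generic_alt
  rw [pvSlotPre token prefix_list]
  cases pvLongest (fun c => PySem.Str.startswith token c) prefix_list with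
  | none =>
    simp only
    rw [pvSlotPre token gallows_list]
    cases pvLongest (fun c => PySem.Str.startswith token c) gallows_list with
    | none =>
      simp only
      rw [pvSlotSuf token suffix_list]
    | some g =>
      simp only
      rw [pvSlotSuf _ suffix_list]
  | some p =>
    simp only
    rw [pvSlotPre _ gallows_list]
    cases pvLongest (fun c => PySem.Str.startswith (PySem.Str.slice token (some (PySem.Str.len p)) none) c) gallows_list with
    | none =>
      simp only
      rw [pvSlotSuf _ suffix_list]
    | some g =>
      simp only
      rw [pvSlotSuf _ suffix_list]
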